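-- pv_equiv track=rewrite | github.com/akhandsingh17/assignments | codingexercise/UniqueDigits.py | uniquedigits
-- ===== SOURCE A (Python) =====
-- def uniquedigits(num):
--
--     dict={}
--
--     while num!=0:
--         rem=num%10
--         if rem in dict.keys():
--             return False
--         else:
--             dict[rem]=1
--         num=int(num/10)
--
--     return True
-- ===== SOURCE B (Python) =====
-- def uniquedigits(num):
--     # collect every digit (same extraction as the original: num % 10, int(num / 10)),
--     # then compare cardinalities instead of testing membership inside the loop
--     digits = []
--     while num != 0:
--         digits.append(num % 10)
--         num = int(num / 10)
--     return len(set(digits)) == len(digits)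
-- ===== Notes on version B (the rewrite author's own statement) =====
-- stated objective: simpler
-- what changed: A scans with an early exit, checking each digit against a dict of already-seen digits; B first collects all digits into a list and then decides uniqueness once by comparing len(set(digits)) with len(digits).
import Mathlib
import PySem

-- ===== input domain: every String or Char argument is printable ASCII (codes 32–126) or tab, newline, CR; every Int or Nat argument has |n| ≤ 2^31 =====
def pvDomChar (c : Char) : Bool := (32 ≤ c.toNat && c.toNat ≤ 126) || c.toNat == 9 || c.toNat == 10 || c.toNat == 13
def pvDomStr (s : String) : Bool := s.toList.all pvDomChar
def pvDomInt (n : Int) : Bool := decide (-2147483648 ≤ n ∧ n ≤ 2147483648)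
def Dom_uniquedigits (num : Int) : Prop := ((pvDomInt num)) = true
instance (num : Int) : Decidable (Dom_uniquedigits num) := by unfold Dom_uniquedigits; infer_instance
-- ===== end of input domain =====

-- B collects all digits (same extraction: num % 10, int(num / 10)) and then decides
-- uniqueness once by comparing len(set(digits)) with len(digits), instead of A's
-- early-exit scan against a dict of seen digits; objective: simpler decomposition.


-- `int(num/10)`: true division then truncation toward zero; for |num| ≤ 2^31 the float
-- quotient is close enough that truncation is exact, so this is Int.tdiv on Dom.
theorem tdiv10_natAbs_lt (num : Int) (h : num ≠ 0) :
    (Int.tdiv num 10).natAbs < num.natAbs := by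
  rw [Int.natAbs_tdiv]
  exact Nat.div_lt_self (Int.natAbs_pos.mpr h) (by norm_num)

-- ===== PORT A =====
-- the while loop: dict of already-seen remainders, early return False on a repeat
def uniquedigitsGo (d : PySem.Dict Int Int) (num : Int) : Bool :=
  if num = 0 then true
  else if d.contains (PySem.Int.mod num 10) then false
  else uniquedigitsGo (d.insert (PySem.Int.mod num 10) 1) (Int.tdiv num 10)
termination_by num.natAbs
decreasing_by exact tdiv10_natAbs_lt _ (by assumption)

def uniquedigits (num : Int) : Bool := uniquedigitsGo PySem.Dict.empty num

-- ===== PORT B =====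
-- same extraction loop, collecting the digits into a list
def digitsOf (num : Int) : List Int :=
  if num = 0 then []
  else PySem.Int.mod num 10 :: digitsOf (Int.tdiv num 10)
termination_by num.natAbs
decreasing_by exact tdiv10_natAbs_lt _ (by assumption)

def uniquedigits_alt (num : Int) : Bool :=
  let digits := digitsOf num
  (PySem.Set.ofList digits).length == digits.length

-- ===== PRECONDITION & SPEC =====
def Spec_uniquedigits (num : Int) (out : Bool) : Prop := out = uniquedigits_alt num
instance (num : Int) (out : Bool) : Decidable (Spec_uniquedigits num out) := by unfold Spec_uniquedigits; infer_instance

-- ===== CLAIM (what is proved, stated in full; the proofs are below) =====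
def Claim_equal_uniquedigits : Prop := ∀ (num : Int), Dom_uniquedigits num → Spec_uniquedigits num (uniquedigits num)

-- ===== LEMMAS AND PROOFS =====

-- A's loop succeeds iff the remaining digits are distinct and none was seen before
theorem go_iff (d : PySem.Dict Int Int) (num : Int) :
    uniquedigitsGo d num = true ↔
      (digitsOf num).Nodup ∧ ∀ x ∈ digitsOf num, d.contains x = false := by
  induction d, num using uniquedigitsGo.induct with
  | case1 d =>
    rw [uniquedigitsGo, digitsOf]
    simp
  | case2 d num h hc =>
    rw [uniquedigitsGo, digitsOf, if_neg h, if_neg h, if_pos hc]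
    simp only [Bool.false_eq_true, false_iff, not_and]
    intro _ hall
    have := hall (PySem.Int.mod num 10) (List.mem_cons_self ..)
    rw [hc] at this; exact absurd this (by simp)
  | case3 d num h hc ih =>
    rw [uniquedigitsGo, digitsOf, if_neg h, if_neg h, if_neg hc]
    rw [ih]
    constructor
    · rintro ⟨hnd, hall⟩
      have hnotmem : PySem.Int.mod num 10 ∉ digitsOf (Int.tdiv num 10) := by
        intro hmem
        have := hall _ hmem
        rw [PySem.Dict.contains_insert] at this
        simp at this
      refine ⟨List.nodup_cons.mpr ⟨hnotmem, hnd⟩, ?_⟩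
      intro x hx
      rcases List.mem_cons.mp hx with rfl | hx
      · simp only [Bool.not_eq_true] at hc; exact hc
      · have := hall x hx
        rw [PySem.Dict.contains_insert] at this
        simp only [Bool.or_eq_false_iff] at this
        exact this.2
    · rintro ⟨hnd, hall⟩
      rcases List.nodup_cons.mp hnd with ⟨hnotmem, hnd'⟩
      refine ⟨hnd', ?_⟩
      intro x hx
      rw [PySem.Dict.contains_insert]
      have hne : x ≠ PySem.Int.mod num 10 := fun hxe => hnotmem (hxe ▸ hx)
      rw [Bool.or_eq_false_iff]
      exact ⟨beq_eq_false_iff_ne.mpr hne, hall x (List.mem_cons_of_mem _ hx)⟩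

-- len(set(xs)) == len(xs) is exactly Nodup
theorem length_ofList_eq_iff (xs : List Int) :
    (PySem.Set.ofList xs).length = xs.length ↔ xs.Nodup := by
  induction xs with
  | nil => simp
  | cons x xs ih =>
    rw [PySem.Set.ofList_cons]
    by_cases hx : x ∈ xs
    · have hxs : x ∈ PySem.Set.ofList xs := (PySem.Set.mem_ofList xs x).mpr hx
      have hlt : ((PySem.Set.ofList xs).discard x).length < (PySem.Set.ofList xs).length := by
        unfold PySem.Set.discard
        refine List.length_filter_lt_length_iff_exists.mpr ⟨x, hxs, by simp⟩
      have hle := PySem.Set.length_ofList_le xs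
      constructor
      · intro hlen
        simp only [List.length_cons] at hlen
        omega
      · intro hnd
        exact absurd hx (List.nodup_cons.mp hnd).1
    · have heq : (PySem.Set.ofList xs).discard x = PySem.Set.ofList xs := by
        unfold PySem.Set.discard
        refine List.filter_eq_self.mpr ?_
        intro y hy
        have : y ∈ xs := (PySem.Set.mem_ofList xs y).mp hy
        have : y ≠ x := fun h => hx (h ▸ this)
        simp [this]
      rw [heq]
      simp only [List.length_cons, Nat.add_left_inj, ih, List.nodup_cons]
      exact (and_iff_right hx).symm

-- ===== VERDICT (by name: the statement is the Claim_ definition above) =====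
theorem uniquedigits_spec : Claim_equal_uniquedigits := by
  intro num _
  unfold Spec_uniquedigits uniquedigits uniquedigits_alt
  rw [Bool.eq_iff_iff, go_iff, beq_iff_eq, length_ofList_eq_iff]
  simp [PySem.Dict.contains_empty]
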